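-- pv_equiv track=rewrite | github.com/rjtrout/ling165 | Lab4/lab4.py | exhaust_align
-- ===== SOURCE A (Python) =====
-- def exhaust_align(s, e):
-- 	"""List all possible ways to align words from s to e.
--
-- 	Args:
-- 	- s: a list of words
-- 	- e: a list of words
-- 	Returns:
-- 	- a list of index pairs
-- 	-- index pair (i, j) means s[i] --> e[j]
-- 	"""
-- 	ns = len(s); ne = len(e)
-- 	out = [[]]
-- 	for j in range(ne):
-- 		temp = []
-- 		for x in out:
-- 			for k in range(ns):
-- 				temp.append(x+[(k, j)])
-- 		out = temp + []
-- 	return out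
-- ===== SOURCE B (Python) =====
-- def exhaust_align(s, e):
--     """List all possible ways to align words from s to e (same value as A).
--
--     Counts the alignments in closed form (ns ** ne) and decodes each
--     counter value as a base-ns numeral, least-significant digit = last
--     english position, so the enumeration order matches the odometer order.
--     """
--     ns, ne = len(s), len(e)
--     out = []
--     for m in range(ns ** ne):
--         combo = []
--         for j in range(ne - 1, -1, -1):
--             combo.append((m % ns, j))
--             m //= ns
--         combo.reverse()
--         out.append(combo)
--     return out
-- ===== Notes on version B (the rewrite author's own statement) =====
-- stated objective: alternative
-- what changed: Replaces A's level-by-level growth of partial alignments (rebuild the whole list once per english word) by a closed-form count ns**ne with each alignment decoded directly from its counter value as a base-ns numeral.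
import Mathlib
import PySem

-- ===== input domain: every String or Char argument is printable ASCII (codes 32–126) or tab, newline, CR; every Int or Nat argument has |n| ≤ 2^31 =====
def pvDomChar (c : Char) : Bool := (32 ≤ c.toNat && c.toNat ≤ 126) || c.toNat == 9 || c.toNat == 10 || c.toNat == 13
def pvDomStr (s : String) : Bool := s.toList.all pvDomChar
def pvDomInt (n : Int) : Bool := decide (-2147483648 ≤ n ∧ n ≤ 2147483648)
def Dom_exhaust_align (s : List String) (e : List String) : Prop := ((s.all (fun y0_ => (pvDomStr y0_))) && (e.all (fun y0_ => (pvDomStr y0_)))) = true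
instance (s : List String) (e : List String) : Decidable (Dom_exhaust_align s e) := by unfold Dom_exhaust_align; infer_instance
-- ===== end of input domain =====

-- B replaces A's level-by-level growth of partial alignments by counting ns^ne
-- alignments in closed form and decoding each counter as a base-ns numeral (alternative).

-- ===== PORT A =====
-- literal transliteration of A: grow `out` once per english position j,
-- appending every extension x+[(k,j)] in order.
def exhaust_align (s : List String) (e : List String) : List (List (Int × Int)) :=
  let ns := s.length
  let ne := e.length
  (List.range ne).foldl
    (fun out (j : Nat) =>
      out.foldl
        (fun temp x =>
          (List.range ns).foldl (fun temp2 (k : Nat) => temp2 ++ [x ++ [((k : Int), (j : Int))]]) temp)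
        [])
    [[]]

-- ===== PORT B =====
-- inner loop of Source B: `for j in range(ne-1,-1,-1): combo.append((m % ns, j)); m //= ns`
def bLoop (ns : Nat) (m : Nat) (j : Nat) (acc : List (Int × Int)) : List (Int × Int) :=
  match j with
  | 0 => acc
  | j' + 1 => bLoop ns (m / ns) j' (acc ++ [(((m % ns : Nat) : Int), (j' : Int))])

def exhaust_align_alt (s : List String) (e : List String) : List (List (Int × Int)) :=
  let ns := s.length
  let ne := e.length
  (List.range (ns ^ ne)).map (fun m => (bLoop ns m ne []).reverse)

-- ===== PRECONDITION & SPEC =====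
def Spec_exhaust_align (s : List String) (e : List String) (out : List (List (Int × Int))) : Prop := out = exhaust_align_alt s e
instance (s : List String) (e : List String) (out : List (List (Int × Int))) : Decidable (Spec_exhaust_align s e out) := by unfold Spec_exhaust_align; infer_instance

-- ===== CLAIM (what is proved, stated in full; the proofs are below) =====
def Claim_equal_exhaust_align : Prop := ∀ (s : List String) (e : List String), Dom_exhaust_align s e → Spec_exhaust_align s e (exhaust_align s e)

-- ===== LEMMAS AND PROOFS =====

-- appending one element per iteration is map
theorem foldl_push {α β : Type} (g : α → β) (l : List α) (acc : List β) :
    l.foldl (fun t k => t ++ [g k]) acc = acc ++ l.map g := by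
  induction l generalizing acc with
  | nil => simp
  | cons a l ih => simp [List.foldl_cons, ih]

-- appending a block per iteration is flatMap
theorem foldl_block {α β : Type} (h : α → List β) (l : List α) (acc : List β) :
    l.foldl (fun t x => t ++ h x) acc = acc ++ l.flatMap h := by
  induction l generalizing acc with
  | nil => simp
  | cons a l ih => simp [List.foldl_cons, ih]

-- decompose range (a*b) into b-blocks
theorem range_mul_map {α : Type} (a b : Nat) (f : Nat → α) :
    (List.range (a * b)).map f
      = (List.range a).flatMap (fun q => (List.range b).map (fun (r : Nat) => f (q * b + r))) := by
  induction a with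
  | zero => simp
  | succ a ih =>
      have h1 : (a + 1) * b = a * b + b := by ring
      rw [h1, List.range_add, List.map_append, List.range_succ, List.flatMap_append, ih]
      simp [List.map_map, Function.comp, Nat.add_comm, Nat.mul_comm]

theorem bLoop_acc (ns : Nat) (m j : Nat) (acc : List (Int × Int)) :
    bLoop ns m j acc = acc ++ bLoop ns m j [] := by
  induction j generalizing m acc with
  | zero => simp [bLoop]
  | succ j ih =>
      rw [bLoop, bLoop, ih (m / ns), ih (m / ns) ([] ++ _)]
      simp

theorem exhaust_core (ns ne : Nat) :
    (List.range ne).foldl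
      (fun out (j : Nat) =>
        out.foldl
          (fun temp x =>
            (List.range ns).foldl (fun temp2 (k : Nat) => temp2 ++ [x ++ [((k : Int), (j : Int))]]) temp)
          [])
      [[]]
    = (List.range (ns ^ ne)).map (fun m => (bLoop ns m ne []).reverse) := by
  induction ne with
  | zero => simp [bLoop]
  | succ ne ih =>
      rw [List.range_succ, List.foldl_append, ih, List.foldl_cons, List.foldl_nil]
      have hstep : ∀ (L : List (List (Int × Int))),
          L.foldl
            (fun temp x =>
              (List.range ns).foldl
                (fun temp2 (k : Nat) => temp2 ++ [x ++ [((k : Int), (ne : Int))]]) temp)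
            []
          = L.flatMap (fun x => (List.range ns).map (fun (k : Nat) => x ++ [((k : Int), (ne : Int))])) := by
        intro L
        have h1 : ∀ (x : List (Int × Int)) (temp : List (List (Int × Int))),
            (List.range ns).foldl
              (fun temp2 (k : Nat) => temp2 ++ [x ++ [((k : Int), (ne : Int))]]) temp
            = temp ++ (List.range ns).map (fun (k : Nat) => x ++ [((k : Int), (ne : Int))]) := by
          intro x temp
          exact foldl_push (fun (k : Nat) => x ++ [((k : Int), (ne : Int))]) (List.range ns) temp
        simp only [h1]
        exact foldl_block _ L []
      rw [hstep]
      have hpow : ns ^ (ne + 1) = ns ^ ne * ns := by ring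
      rw [hpow, range_mul_map]
      rw [List.flatMap_map]
      refine List.flatMap_congr ?_
      intro q hq
      apply List.map_congr_left
      intro r hr
      have hr' : r < ns := List.mem_range.mp hr
      have hpos : 0 < ns := Nat.pos_of_ne_zero (by omega)
      have hdiv : (q * ns + r) / ns = q := by
        rw [Nat.mul_comm q ns, Nat.mul_add_div hpos, Nat.div_eq_of_lt hr']
        omega
      have hmod : (q * ns + r) % ns = r := by
        rw [Nat.mul_comm q ns, Nat.mul_add_mod, Nat.mod_eq_of_lt hr']
      show (bLoop ns q ne []).reverse ++ [((r : Int), (ne : Int))]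
          = (bLoop ns (q * ns + r) (ne + 1) []).reverse
      rw [bLoop, bLoop_acc, hdiv, hmod]
      rw [bLoop_acc ns q ne ([] ++ _)]
      simp

-- ===== VERDICT (by name: the statement is the Claim_ definition above) =====
theorem exhaust_align_spec : Claim_equal_exhaust_align := by
  intro s e _
  unfold Spec_exhaust_align exhaust_align exhaust_align_alt
  exact exhaust_core s.length e.length
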